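-- pv_equiv track=rewrite | github.com/kuopinghsu/jv32.dev | syn/scripts/gen_gate_count.py | count_icg_dff_direct
-- ===== SOURCE A (Python) =====
-- from typing import Dict, List, Set, Tuple
--
-- def clean_name(raw: str) -> str:
--     """Strip Yosys module-name decorations.
--
--     Examples::
--         \\jv32_soc                               → jv32_soc
--         $paramod$7932...\\jv32_top               → jv32_top
--         $paramod\\jv32_rvc\\RVM23_EN=1'1         → jv32_rvc
--     """
--     name = raw.lstrip("\\")
--     if name.startswith("$paramod"):
--         parts = name.split("\\")
--         if len(parts) >= 2:
--             return parts[1]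
--     return name
--
-- def count_icg_dff_direct(
--     modules: dict,
--     lib_cells: Set[str],
-- ) -> Dict[str, Tuple[int, int, int]]:
--     """Return {clean_module_name: (icg_count, dff_count, sdff_count)} for direct cells only.
--
--     ICG cells  : names containing 'CLKGATE' (CLKGATE_X1, CLKGATETST_X1, …)
--     DFF cells  : names starting with 'DFF'  (DFF_X1, DFFR_X1, DFFS_X1, …)
--     SDFF cells : names starting with 'SDFF' (SDFF_X1, SDFFR_X1, …) — scan FFs
--     """
--     result: Dict[str, Tuple[int, int, int]] = {}
--     for raw_name, mod in modules.items():
--         cname = clean_name(raw_name)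
--         icg = dff = sdff = 0
--         for cell_type, cnt in mod.get("num_cells_by_type", {}).items():
--             ct = clean_name(cell_type)
--             if ct not in lib_cells:
--                 continue  # skip sub-module instances
--             ctu = ct.upper()
--             if "CLKGATE" in ctu:
--                 icg += int(cnt)
--             elif ctu.startswith("SDFF"):
--                 sdff += int(cnt)
--             elif ctu.startswith("DFF"):
--                 dff += int(cnt)
--         result[cname] = (icg, dff, sdff)
--     return result
-- ===== SOURCE B (Python) =====
-- def clean_name(raw: str) -> str:
--     name = raw.lstrip("\\")
--     if name.startswith("$paramod"):
--         parts = name.split("\\")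
--         if len(parts) >= 2:
--             return parts[1]
--     return name
--
-- def count_icg_dff_direct(modules, lib_cells):
--     """Per module: pre-filter/normalise the library cells once, then take three
--     independent filtered sums instead of one priority-cascade loop."""
--     result = {}
--     for raw_name, mod in modules.items():
--         cells = [(clean_name(t).upper(), int(c))
--                  for t, c in mod.get("num_cells_by_type", {}).items()
--                  if clean_name(t) in lib_cells]
--         icg = sum(n for u, n in cells if "CLKGATE" in u)
--         dff = sum(n for u, n in cells if u.startswith("DFF") and "CLKGATE" not in u)
--         sdff = sum(n for u, n in cells if u.startswith("SDFF") and "CLKGATE" not in u)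
--         result[clean_name(raw_name)] = (icg, dff, sdff)
--     return result
-- ===== Notes on version B (the rewrite author's own statement) =====
-- stated objective: alternative
-- what changed: Replaces A's single priority-cascade inner loop (if/elif/elif over a 3-tuple accumulator) with one pre-filtering/normalising pass per module followed by three independent filtered sums, encoding the elif precedence as explicit predicate conjunctions.
import Mathlib
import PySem

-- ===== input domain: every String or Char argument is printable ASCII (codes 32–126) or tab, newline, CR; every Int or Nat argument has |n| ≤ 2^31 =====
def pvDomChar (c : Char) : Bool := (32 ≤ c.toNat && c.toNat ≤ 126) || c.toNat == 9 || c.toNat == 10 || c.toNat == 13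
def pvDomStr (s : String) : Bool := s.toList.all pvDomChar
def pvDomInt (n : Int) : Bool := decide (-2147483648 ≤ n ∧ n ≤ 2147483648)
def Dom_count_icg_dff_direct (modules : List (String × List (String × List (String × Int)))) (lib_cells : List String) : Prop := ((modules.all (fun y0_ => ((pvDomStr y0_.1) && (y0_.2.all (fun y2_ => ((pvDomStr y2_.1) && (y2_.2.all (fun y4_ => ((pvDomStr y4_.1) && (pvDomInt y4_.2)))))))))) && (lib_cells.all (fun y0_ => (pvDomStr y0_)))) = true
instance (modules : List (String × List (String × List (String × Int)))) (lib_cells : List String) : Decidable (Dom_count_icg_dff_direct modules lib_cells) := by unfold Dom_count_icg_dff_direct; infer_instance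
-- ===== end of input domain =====

-- B replaces A's single priority-cascade inner loop by one filtering pass plus three independent filtered sums (alternative decomposition, same cost).


-- ===== PORT A =====
-- clean_name (shared helper of both Pythons).  raw.lstrip("\\") is ported by hand as
-- dropWhile (· == '\\') on the char list — exact: lstrip with an explicit char set drops
-- exactly the leading characters from that set.
def pvCleanName (raw : String) : String :=
  let name := String.ofList (raw.toList.dropWhile (fun c => c == '\\'))
  if PySem.Str.startswith name "$paramod" then
    match PySem.Str.split? name "\\" with
    | some parts =>
        if parts.length ≥ 2 then
          match PySem.List.pyGet? parts 1 with
          | some p => p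
          | none => name
        else name
    | none => name
  else name

-- body of A's inner 'for cell_type, cnt in …' loop (state = (icg, dff, sdff))
def pvStepA (lib_cells : List String) (s : Int × Int × Int) (tc : String × Int) : Int × Int × Int :=
  let ct := pvCleanName tc.1
  if !(PySem.Set.contains lib_cells ct) then s
  else
    let ctu := PySem.Str.upper ct
    if PySem.Str.isIn "CLKGATE" ctu then (s.1 + tc.2, s.2.1, s.2.2)
    else if PySem.Str.startswith ctu "SDFF" then (s.1, s.2.1, s.2.2 + tc.2)
    else if PySem.Str.startswith ctu "DFF" then (s.1, s.2.1 + tc.2, s.2.2)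
    else s

def count_icg_dff_direct (modules : List (String × List (String × List (String × Int)))) (lib_cells : List String) : List (String × Int × Int × Int) :=
  (modules.foldl
    (fun (result : PySem.Dict String (Int × Int × Int)) rm =>
      let cname := pvCleanName rm.1
      let t := ((PySem.Dict.mk rm.2).getD "num_cells_by_type" []).foldl (pvStepA lib_cells) (0, 0, 0)
      result.insert cname t)
    PySem.Dict.empty).items

-- ===== PORT B =====
-- the filtered, upper-cased (name, count) list built once per module
def pvFiltered (lib_cells : List String) (cells : List (String × Int)) : List (String × Int) :=
  cells.filterMap (fun tc =>
    let ct := pvCleanName tc.1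
    if PySem.Set.contains lib_cells ct then some (PySem.Str.upper ct, tc.2) else none)

-- sum(n for u, n in cells if p u)
def pvSumIf (p : String → Bool) (cells : List (String × Int)) : Int :=
  ((cells.filter (fun q => p q.1)).map Prod.snd).sum

def count_icg_dff_direct_alt (modules : List (String × List (String × List (String × Int)))) (lib_cells : List String) : List (String × Int × Int × Int) :=
  (modules.foldl
    (fun (result : PySem.Dict String (Int × Int × Int)) rm =>
      let cs := pvFiltered lib_cells ((PySem.Dict.mk rm.2).getD "num_cells_by_type" [])
      let icg := pvSumIf (fun u => PySem.Str.isIn "CLKGATE" u) cs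
      let dff := pvSumIf (fun u => PySem.Str.startswith u "DFF" && !PySem.Str.isIn "CLKGATE" u) cs
      let sdff := pvSumIf (fun u => PySem.Str.startswith u "SDFF" && !PySem.Str.isIn "CLKGATE" u) cs
      result.insert (pvCleanName rm.1) (icg, dff, sdff))
    PySem.Dict.empty).items

-- ===== PRECONDITION & SPEC =====
def Spec_count_icg_dff_direct (modules : List (String × List (String × List (String × Int)))) (lib_cells : List String) (out : List (String × Int × Int × Int)) : Prop := out = count_icg_dff_direct_alt modules lib_cells
instance (modules : List (String × List (String × List (String × Int)))) (lib_cells : List String) (out : List (String × Int × Int × Int)) : Decidable (Spec_count_icg_dff_direct modules lib_cells out) := by unfold Spec_count_icg_dff_direct; infer_instance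

-- ===== CLAIM (what is proved, stated in full; the proofs are below) =====
def Claim_equal_count_icg_dff_direct : Prop := ∀ (modules : List (String × List (String × List (String × Int)))) (lib_cells : List String), Dom_count_icg_dff_direct modules lib_cells → Spec_count_icg_dff_direct modules lib_cells (count_icg_dff_direct modules lib_cells)

-- ===== LEMMAS AND PROOFS =====

-- a string starting with "DFF" does not start with "SDFF"
theorem pv_dff_not_sdff (s : String) (h : PySem.Str.startswith s "DFF" = true) :
    PySem.Str.startswith s "SDFF" = false := by
  simp only [PySem.Str.startswith_eq] at h ⊢
  rw [PySem.Chars.startswith_iff] at h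
  rw [← Bool.not_eq_true, PySem.Chars.startswith_iff]
  intro h2
  obtain ⟨t, ht⟩ := h
  obtain ⟨u, hu⟩ := h2
  rw [← ht] at hu
  simp at hu

theorem pvSumIf_cons (p : String → Bool) (u : String) (n : Int) (cs : List (String × Int)) :
    pvSumIf p ((u, n) :: cs) = (if p u then n else 0) + pvSumIf p cs := by
  simp only [pvSumIf, List.filter_cons]
  split_ifs <;> simp

-- A's cascade fold equals B's three filtered sums, over any start state
theorem pv_inner (lib_cells : List String) (cells : List (String × Int)) (a b c : Int) :
    cells.foldl (pvStepA lib_cells) (a, b, c) =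
      (a + pvSumIf (fun u => PySem.Str.isIn "CLKGATE" u) (pvFiltered lib_cells cells),
       b + pvSumIf (fun u => PySem.Str.startswith u "DFF" && !PySem.Str.isIn "CLKGATE" u) (pvFiltered lib_cells cells),
       c + pvSumIf (fun u => PySem.Str.startswith u "SDFF" && !PySem.Str.isIn "CLKGATE" u) (pvFiltered lib_cells cells)) := by
  induction cells generalizing a b c with
  | nil => simp [pvFiltered, pvSumIf]
  | cons tc rest ih =>
      simp only [List.foldl_cons]
      by_cases hm : PySem.Set.contains lib_cells (pvCleanName tc.1)
      · have hf : pvFiltered lib_cells (tc :: rest)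
            = (PySem.Str.upper (pvCleanName tc.1), tc.2) :: pvFiltered lib_cells rest := by
          simp only [pvFiltered, List.filterMap_cons, hm, if_pos]
        rw [hf, pvSumIf_cons, pvSumIf_cons, pvSumIf_cons]
        by_cases hc : PySem.Str.isIn "CLKGATE" (PySem.Str.upper (pvCleanName tc.1))
        · simp only [pvStepA, hm, hc, Bool.not_true, Bool.false_eq_true, Bool.and_false,
            if_false, if_true, ite_true, ite_false]
          rw [ih]
          simp only [Prod.mk.injEq]
          refine ⟨by omega, by omega, by omega⟩
        · by_cases hs : PySem.Str.startswith (PySem.Str.upper (pvCleanName tc.1)) "SDFF"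
          · have hdf : PySem.Str.startswith (PySem.Str.upper (pvCleanName tc.1)) "DFF" = false := by
              cases hq : PySem.Str.startswith (PySem.Str.upper (pvCleanName tc.1)) "DFF" with
              | false => rfl
              | true => exact absurd hs (by rw [pv_dff_not_sdff _ hq]; simp)
            simp only [pvStepA, hm, hc, hs, hdf, Bool.not_true, Bool.not_false, Bool.and_true,
              Bool.true_and, Bool.false_and, Bool.false_eq_true, if_false, if_true, ite_true,
              ite_false]
            rw [ih]
            simp only [Prod.mk.injEq]
            refine ⟨by omega, by omega, by omega⟩
          · by_cases hd : PySem.Str.startswith (PySem.Str.upper (pvCleanName tc.1)) "DFF"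
            · simp only [pvStepA, hm, hc, hs, hd, Bool.not_true, Bool.not_false, Bool.and_true,
                Bool.true_and, Bool.false_and, Bool.false_eq_true, if_false, if_true, ite_true,
                ite_false]
              rw [ih]
              simp only [Prod.mk.injEq]
              refine ⟨by omega, by omega, by omega⟩
            · simp only [pvStepA, hm, hc, hs, hd, Bool.not_true, Bool.not_false, Bool.and_true,
                Bool.true_and, Bool.false_and, Bool.false_eq_true, if_false, if_true, ite_true,
                ite_false]
              rw [ih]
              simp only [Prod.mk.injEq]
              refine ⟨by omega, by omega, by omega⟩
      · have hf : pvFiltered lib_cells (tc :: rest) = pvFiltered lib_cells rest := by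
          simp only [pvFiltered, List.filterMap_cons, hm, Bool.false_eq_true, if_neg,
            not_false_eq_true]
        rw [hf, show pvStepA lib_cells (a, b, c) tc = (a, b, c) from by
          simp only [pvStepA, hm, Bool.not_false, Bool.false_eq_true, if_true, ite_true]]
        exact ih a b c

-- the two module folds agree from any accumulator dict
theorem pv_outer (lib_cells : List String) (modules : List (String × List (String × List (String × Int)))) (d : PySem.Dict String (Int × Int × Int)) :
    modules.foldl
      (fun (result : PySem.Dict String (Int × Int × Int)) rm =>
        let cname := pvCleanName rm.1
        let t := ((PySem.Dict.mk rm.2).getD "num_cells_by_type" []).foldl (pvStepA lib_cells) (0, 0, 0)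
        result.insert cname t) d =
    modules.foldl
      (fun (result : PySem.Dict String (Int × Int × Int)) rm =>
        let cs := pvFiltered lib_cells ((PySem.Dict.mk rm.2).getD "num_cells_by_type" [])
        let icg := pvSumIf (fun u => PySem.Str.isIn "CLKGATE" u) cs
        let dff := pvSumIf (fun u => PySem.Str.startswith u "DFF" && !PySem.Str.isIn "CLKGATE" u) cs
        let sdff := pvSumIf (fun u => PySem.Str.startswith u "SDFF" && !PySem.Str.isIn "CLKGATE" u) cs
        result.insert (pvCleanName rm.1) (icg, dff, sdff)) d := by
  induction modules generalizing d with
  | nil => rfl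
  | cons m rest ih =>
      simp only [List.foldl_cons]
      rw [pv_inner, zero_add, zero_add, zero_add]
      exact ih _

-- ===== VERDICT (by name: the statement is the Claim_ definition above) =====
theorem count_icg_dff_direct_spec : Claim_equal_count_icg_dff_direct := by
  intro modules lib_cells _
  unfold Spec_count_icg_dff_direct count_icg_dff_direct count_icg_dff_direct_alt
  rw [pv_outer]
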